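-- pv_equiv track=rewrite | github.com/miliar/Code_Jam_Webscraper | solutions_python/solutions_year14_round0_nr4/1067.py | get_war_results
-- ===== SOURCE A (Python) =====
-- def get_war_results(naomi_blocks, ken_blocks):
--     result = 0
--     for n in naomi_blocks:
--         bigger = [x for x in ken_blocks if x > n]
--         if not bigger:
--             result += 1
--         else:
--             ken_blocks.remove(min(bigger))
--     return result
-- ===== SOURCE B (Python) =====
-- def get_war_results(naomi_blocks, ken_blocks):
--     # Sort BOTH lists once and sweep them with two pointers: each Naomi block
--     # (in increasing order) is beaten by the smallest not-yet-used Ken block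
--     # bigger than it; Ken blocks skipped because they are <= the current Naomi
--     # block can never beat any later (larger) Naomi block, so the sweep never
--     # backtracks.  Same answer as the greedy in the original order.
--     ks = sorted(ken_blocks)
--     result = 0
--     j = 0
--     for n in sorted(naomi_blocks):
--         while j < len(ks) and ks[j] <= n:
--             j += 1
--         if j < len(ks):
--             j += 1          # ks[j] beats n
--         else:
--             result += 1     # no Ken block bigger than n remains
--     return result
-- ===== Notes on version B (the rewrite author's own statement) =====
-- stated objective: faster
-- what changed: B sorts both lists once and counts unmatched Naomi blocks with a single non-backtracking two-pointer sweep, instead of A's per-round filter+min scan and removal from Ken's list; correctness rests on the greedy result being invariant under the processing order of Naomi's blocks.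
import Mathlib
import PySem

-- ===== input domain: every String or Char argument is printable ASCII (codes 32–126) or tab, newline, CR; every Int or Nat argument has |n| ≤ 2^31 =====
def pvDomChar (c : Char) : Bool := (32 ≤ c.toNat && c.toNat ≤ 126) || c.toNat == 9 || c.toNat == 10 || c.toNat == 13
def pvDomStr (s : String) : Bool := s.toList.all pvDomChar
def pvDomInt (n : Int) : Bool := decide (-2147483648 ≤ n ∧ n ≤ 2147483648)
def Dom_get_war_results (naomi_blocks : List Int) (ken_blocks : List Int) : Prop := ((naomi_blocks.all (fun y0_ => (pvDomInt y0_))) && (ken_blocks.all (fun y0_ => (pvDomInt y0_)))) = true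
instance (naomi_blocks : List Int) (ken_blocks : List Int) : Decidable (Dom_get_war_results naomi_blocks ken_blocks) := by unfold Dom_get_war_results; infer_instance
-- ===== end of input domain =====

-- B sorts both lists once and counts unmatched Naomi blocks by one two-pointer
-- sweep (no removals, no per-round scan): asymptotically faster.
-- Python A mutates ken_blocks in place (list.remove); the equivalence proved here
-- is about the RETURN value only (B leaves its arguments untouched).

-- ===== PORT A =====
-- A's loop: state (result, ken_blocks); per Naomi block, filter the bigger Ken
-- blocks, count a point if none, else remove the min of them (first occurrence).
def warLoopA (r : Int) (ken : List Int) (ns : List Int) : Int :=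
  match ns with
  | [] => r
  | n :: rest =>
    let bigger := ken.filter (fun x => decide (n < x))
    if bigger.isEmpty then
      warLoopA (r + 1) ken rest
    else
      -- min(bigger) and list.remove never fail here (bigger ≠ [] and min ∈ ken): the
      -- getD fallbacks are unreachable.
      warLoopA r ((PySem.List.remove? ken ((PySem.List.min? bigger (fun x => x)).getD 0)).getD ken) rest

def get_war_results (naomi_blocks : List Int) (ken_blocks : List Int) : Int :=
  warLoopA 0 ken_blocks naomi_blocks

-- ===== PORT B =====
-- Source B's inner 'while j < len(ks) and ks[j] <= n: j += 1'
def skipB (ks : List Int) (n : Int) (j : Nat) : Nat :=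
  if h : j < ks.length then
    if ks[j] ≤ n then skipB ks n (j + 1) else j
  else j
termination_by ks.length - j

-- Source B's 'for n in sorted(naomi_blocks)' body: advance j, then match or count.
def warLoopB (ks : List Int) (ns : List Int) (j : Nat) (result : Int) : Int :=
  match ns with
  | [] => result
  | n :: rest =>
    let j' := skipB ks n j
    if j' < ks.length then
      warLoopB ks rest (j' + 1) result     -- ks[j'] beats n
    else
      warLoopB ks rest j' (result + 1)     -- no Ken block bigger than n remains

def get_war_results_alt (naomi_blocks : List Int) (ken_blocks : List Int) : Int :=
  warLoopB (PySem.List.sorted ken_blocks (fun x => x))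
           (PySem.List.sorted naomi_blocks (fun x => x)) 0 0

-- ===== PRECONDITION & SPEC =====
def Spec_get_war_results (naomi_blocks : List Int) (ken_blocks : List Int) (out : Int) : Prop := out = get_war_results_alt naomi_blocks ken_blocks
instance (naomi_blocks : List Int) (ken_blocks : List Int) (out : Int) : Decidable (Spec_get_war_results naomi_blocks ken_blocks out) := by unfold Spec_get_war_results; infer_instance

-- ===== CLAIM (what is proved, stated in full; the proofs are below) =====
def Claim_equal_get_war_results : Prop := ∀ (naomi_blocks : List Int) (ken_blocks : List Int), Dom_get_war_results naomi_blocks ken_blocks → Spec_get_war_results naomi_blocks ken_blocks (get_war_results naomi_blocks ken_blocks)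

-- ===== LEMMAS AND PROOFS =====

-- the value of min(l) (as warLoopA reads it, with an unreachable default)
def minV (l : List Int) : Int := (PySem.List.min? l (fun x => x)).getD 0

theorem minV_spec (l : List Int) (h : l ≠ []) : minV l ∈ l ∧ ∀ y ∈ l, minV l ≤ y := by
  have hne : PySem.List.min? l (fun x : Int => x) ≠ none := by
    intro hc; exact h ((PySem.List.min?_eq_none_iff l (fun x : Int => x)).mp hc)
  obtain ⟨m, hm⟩ := Option.ne_none_iff_exists'.mp hne
  have h1 := PySem.List.min?_mem hm
  have h2 := PySem.List.min?_isMin hm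
  simp only [minV, hm, Option.getD_some]
  exact ⟨h1, h2⟩

theorem minV_eq (l : List Int) (m : Int) (hm : m ∈ l) (hmin : ∀ y ∈ l, m ≤ y) : minV l = m := by
  obtain ⟨h1, h2⟩ := minV_spec l (List.ne_nil_of_mem hm)
  exact le_antisymm (h2 m hm) (hmin _ h1)

theorem minV_perm {l l' : List Int} (h : l.Perm l') (hne : l ≠ []) : minV l = minV l' := by
  obtain ⟨h1, h2⟩ := minV_spec l hne
  exact (minV_eq l' (minV l) (h.mem_iff.mp h1) (fun y hy => h2 y (h.mem_iff.mpr hy))).symm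

-- step-shape lemmas for A's loop
theorem warLoopA_cons_empty (r : Int) (ken : List Int) (n : Int) (rest : List Int)
    (h : ken.filter (fun x => decide (n < x)) = []) :
    warLoopA r ken (n :: rest) = warLoopA (r + 1) ken rest := by
  rw [warLoopA]; simp only [h, List.isEmpty_nil, if_true]

theorem warLoopA_cons_ne (r : Int) (ken : List Int) (n : Int) (rest : List Int)
    (h : ken.filter (fun x => decide (n < x)) ≠ []) :
    warLoopA r ken (n :: rest) =
      warLoopA r (ken.erase (minV (ken.filter (fun x => decide (n < x))))) rest := by
  have hmem : ((PySem.List.min? (ken.filter (fun x => decide (n < x))) (fun x => x)).getD 0) ∈ ken :=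
    List.mem_of_mem_filter (minV_spec _ h).1
  rw [warLoopA]
  simp only [List.isEmpty_iff, if_neg h, PySem.List.remove?_eq_some_erase _ _ hmem,
    Option.getD_some]
  rfl

-- A's loop value depends on Ken's blocks only as a multiset
theorem warLoopA_perm (ns : List Int) : ∀ (ken ken' : List Int) (r : Int),
    ken.Perm ken' → warLoopA r ken ns = warLoopA r ken' ns := by
  induction ns with
  | nil => intro ken ken' r _; rfl
  | cons n rest ih =>
    intro ken ken' r hperm
    have hf : (ken.filter (fun x => decide (n < x))).Perm
        (ken'.filter (fun x => decide (n < x))) := hperm.filter _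
    by_cases he : ken.filter (fun x => decide (n < x)) = []
    · have he' : ken'.filter (fun x => decide (n < x)) = [] := by
        rw [he] at hf; exact hf.symm.eq_nil
      rw [warLoopA_cons_empty _ _ _ _ he, warLoopA_cons_empty _ _ _ _ he']
      exact ih ken ken' (r + 1) hperm
    · have he' : ken'.filter (fun x => decide (n < x)) ≠ [] := by
        intro hc; rw [hc] at hf; exact he hf.eq_nil
      rw [warLoopA_cons_ne _ _ _ _ he, warLoopA_cons_ne _ _ _ _ he', minV_perm hf he]
      exact ih _ _ r (hperm.erase _)

-- erasing a value commutes with filtering, according to whether the value passes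
theorem filter_erase_int (l : List Int) (v : Int) (p : Int → Bool) :
    (l.erase v).filter p = if p v then (l.filter p).erase v else l.filter p := by
  induction l with
  | nil => by_cases h : p v <;> simp [h]
  | cons a t ih =>
    by_cases hav : a = v
    · subst hav
      by_cases h : p a <;> simp [h]
    · rw [List.erase_cons_tail (by simp [hav]), List.filter_cons, List.filter_cons, ih]
      by_cases hpv : p v <;> by_cases hpa : p a <;>
        simp [hpv, hpa, hav]

-- swapping two adjacent Naomi blocks (smaller first) does not change A's result
theorem warLoopA_swap_le (a b : Int) (hab : a ≤ b) (ns : List Int) (ken : List Int) (r : Int) :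
    warLoopA r ken (a :: b :: ns) = warLoopA r ken (b :: a :: ns) := by
  by_cases Ha : ken.filter (fun x => decide (a < x)) = []
  · have Hb : ken.filter (fun x => decide (b < x)) = [] := by
      rw [List.filter_eq_nil_iff] at Ha ⊢
      intro x hx hbx
      exact Ha x hx (by simp at hbx ⊢; omega)
    rw [warLoopA_cons_empty _ _ _ _ Ha, warLoopA_cons_empty _ _ _ _ Hb,
        warLoopA_cons_empty _ _ _ _ Hb, warLoopA_cons_empty _ _ _ _ Ha]
  · by_cases Hb : ken.filter (fun x => decide (b < x)) = []
    · -- b finds nothing, before or after a's removal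
      have Hb' : (ken.erase (minV (ken.filter (fun x => decide (a < x))))).filter
          (fun x => decide (b < x)) = [] := by
        rw [List.filter_eq_nil_iff] at Hb ⊢
        intro x hx hbx
        exact Hb x (List.mem_of_mem_erase hx) hbx
      rw [warLoopA_cons_ne _ _ _ _ Ha, warLoopA_cons_empty _ _ _ _ Hb',
          warLoopA_cons_empty _ _ _ _ Hb, warLoopA_cons_ne _ _ _ _ Ha]
    · have hma := minV_spec _ Ha
      have hmb := minV_spec _ Hb
      set ma := minV (ken.filter (fun x => decide (a < x))) with hma_def
      set mb := minV (ken.filter (fun x => decide (b < x))) with hmb_def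
      have hb_lt_mb : b < mb := by have := (List.mem_filter.mp hmb.1).2; simpa using this
      have hmb_in_a : mb ∈ ken.filter (fun x => decide (a < x)) :=
        List.mem_filter.mpr ⟨List.mem_of_mem_filter hmb.1, by simp; omega⟩
      have hma_le_mb : ma ≤ mb := hma.2 _ hmb_in_a
      by_cases hbma : b < ma
      · -- every Ken block bigger than a is also bigger than b: the two filters coincide
        have hcongr : ∀ (K : List Int), (∀ x ∈ K, x ∈ ken) →
            K.filter (fun x => decide (a < x)) = K.filter (fun x => decide (b < x)) := by
          intro K hK
          apply List.filter_congr
          intro x hx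
          simp only [decide_eq_decide]
          constructor
          · intro hax
            have : x ∈ ken.filter (fun x => decide (a < x)) :=
              List.mem_filter.mpr ⟨hK x hx, by simpa using hax⟩
            have := hma.2 _ this
            omega
          · intro hbx; omega
        have hfeq : ken.filter (fun x => decide (a < x)) = ken.filter (fun x => decide (b < x)) :=
          hcongr ken (fun x hx => hx)
        have hmeq : ma = mb := by rw [hma_def, hmb_def, hfeq]
        have hfeq1 : (ken.erase ma).filter (fun x => decide (a < x)) =
            (ken.erase ma).filter (fun x => decide (b < x)) :=
          hcongr _ (fun x hx => List.mem_of_mem_erase hx)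
        rw [warLoopA_cons_ne _ _ _ _ Ha, warLoopA_cons_ne _ _ _ _ Hb, ← hma_def, ← hmb_def,
            ← hmeq]
        by_cases H1 : (ken.erase ma).filter (fun x => decide (b < x)) = []
        · rw [warLoopA_cons_empty _ _ _ _ (hfeq1.trans H1), warLoopA_cons_empty _ _ _ _ H1]
        · rw [warLoopA_cons_ne _ _ _ _ (fun hc => H1 (hfeq1 ▸ hc)), warLoopA_cons_ne _ _ _ _ H1,
              hfeq1]
      · -- ma ≤ b < mb: the two removals are independent and commute
        have hma_le_b : ma ≤ b := by omega
        have hne : ma ≠ mb := by omega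
        -- after removing ma, b still sees exactly its old candidates
        have hLb : (ken.erase ma).filter (fun x => decide (b < x)) =
            ken.filter (fun x => decide (b < x)) := by
          rw [filter_erase_int, if_neg (by simp; omega)]
        -- after removing mb, a's candidates are its old ones minus mb
        have hRa : (ken.erase mb).filter (fun x => decide (a < x)) =
            (ken.filter (fun x => decide (a < x))).erase mb := by
          rw [filter_erase_int, if_pos (by simp; omega)]
        have ha_lt_ma : a < ma := by have := (List.mem_filter.mp hma.1).2; simpa using this
        have hma_in_erased : ma ∈ (ken.filter (fun x => decide (a < x))).erase mb :=
          (List.mem_erase_of_ne hne).mpr hma.1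
        have hRa_ne : (ken.erase mb).filter (fun x => decide (a < x)) ≠ [] := by
          rw [hRa]; exact List.ne_nil_of_mem hma_in_erased
        have hRa_min : minV ((ken.erase mb).filter (fun x => decide (a < x))) = ma := by
          rw [hRa]
          exact minV_eq _ _ hma_in_erased
            (fun y hy => hma.2 y (List.mem_of_mem_erase hy))
        have hLb_ne : (ken.erase ma).filter (fun x => decide (b < x)) ≠ [] := by
          rw [hLb]; exact Hb
        rw [warLoopA_cons_ne _ _ _ _ Ha, warLoopA_cons_ne _ _ _ _ hLb_ne,
            warLoopA_cons_ne _ _ _ _ Hb, warLoopA_cons_ne _ _ _ _ hRa_ne, hRa_min, hLb, ← hmb_def,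
            List.erase_comm]

-- A's loop value is invariant under permuting Naomi's blocks
theorem warLoopA_naomi_perm {ns ns' : List Int} (h : ns.Perm ns') :
    ∀ (ken : List Int) (r : Int), warLoopA r ken ns = warLoopA r ken ns' := by
  induction h with
  | nil => intro ken r; rfl
  | cons x _ ih =>
    intro ken r
    by_cases he : ken.filter (fun t => decide (x < t)) = []
    · rw [warLoopA_cons_empty _ _ _ _ he, warLoopA_cons_empty _ _ _ _ he]; exact ih ken (r + 1)
    · rw [warLoopA_cons_ne _ _ _ _ he, warLoopA_cons_ne _ _ _ _ he]; exact ih _ r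
  | swap x y l =>
    intro ken r
    rcases le_total y x with h | h
    · exact warLoopA_swap_le y x h l ken r
    · exact (warLoopA_swap_le x y h l ken r).symm
  | trans _ _ ih1 ih2 => intro ken r; rw [ih1 ken r, ih2 ken r]

-- drop-based reading of B's sweep (proof-side only)
def dropLe (n : Int) (ks : List Int) : List Int :=
  match ks with
  | [] => []
  | k :: t => if k ≤ n then dropLe n t else k :: t

def warLoopD (ks : List Int) (ns : List Int) (r : Int) : Int :=
  match ns with
  | [] => r
  | n :: rest =>
    match dropLe n ks with
    | [] => warLoopD [] rest (r + 1)
    | _ :: t => warLoopD t rest r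

def takeLe (n : Int) (ks : List Int) : List Int :=
  match ks with
  | [] => []
  | k :: t => if k ≤ n then k :: takeLe n t else []

theorem takeLe_append_dropLe (n : Int) (ks : List Int) : takeLe n ks ++ dropLe n ks = ks := by
  induction ks with
  | nil => rfl
  | cons k t ih =>
    by_cases h : k ≤ n <;> simp [takeLe, dropLe, h, ih]

theorem takeLe_le (n : Int) (ks : List Int) : ∀ x ∈ takeLe n ks, x ≤ n := by
  induction ks with
  | nil => intro x hx; simp [takeLe] at hx
  | cons k t ih =>
    intro x hx
    by_cases h : k ≤ n
    · simp [takeLe, h] at hx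
      rcases hx with rfl | hx
      · exact h
      · exact ih x hx
    · simp [takeLe, h] at hx

theorem dropLe_sublist (n : Int) (ks : List Int) : (dropLe n ks).Sublist ks := by
  induction ks with
  | nil => simp [dropLe]
  | cons k t ih =>
    by_cases h : k ≤ n
    · simp only [dropLe, if_pos h]; exact ih.cons k
    · simp [dropLe, h]

theorem dropLe_head_gt (n : Int) (ks : List Int) (h : Int) (t : List Int)
    (hd : dropLe n ks = h :: t) : n < h := by
  induction ks with
  | nil => simp [dropLe] at hd
  | cons k t' ih =>
    by_cases hk : k ≤ n
    · simp only [dropLe, if_pos hk] at hd; exact ih hd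
    · simp only [dropLe, if_neg hk] at hd
      cases hd; omega

-- on a sorted list, filtering the blocks bigger than n is dropping the prefix ≤ n
theorem filter_gt_sorted (n : Int) (ks : List Int) (hs : ks.Pairwise (· ≤ ·)) :
    ks.filter (fun x => decide (n < x)) = dropLe n ks := by
  induction ks with
  | nil => rfl
  | cons k t ih =>
    rw [List.pairwise_cons] at hs
    by_cases h : k ≤ n
    · rw [List.filter_cons_of_neg (by simp; omega)]
      simp only [dropLe, if_pos h]
      exact ih hs.2
    · rw [List.filter_cons_of_pos (by simp; omega)]
      simp only [dropLe, if_neg h]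
      congr 1
      exact List.filter_eq_self.mpr (fun x hx => by
        have := hs.1 x hx; simp; omega)

theorem erase_head_dropLe (n : Int) (ks : List Int) (h : Int) (t : List Int)
    (hd : dropLe n ks = h :: t) : ks.erase h = takeLe n ks ++ t := by
  have hnh : n < h := dropLe_head_gt n ks h t hd
  have hnot : h ∉ takeLe n ks := by
    intro hc
    have := takeLe_le n ks h hc
    omega
  conv_lhs => rw [← takeLe_append_dropLe n ks, hd]
  rw [List.erase_append_right _ hnot, List.erase_cons_head]

-- sorted-sorted: A's greedy equals the drop-based sweep
theorem warLoopA_sorted (ns : List Int) : ∀ (junk ks : List Int) (r : Int),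
    ns.Pairwise (· ≤ ·) → ks.Pairwise (· ≤ ·) →
    (∀ x ∈ junk, ∀ n ∈ ns, x ≤ n) →
    warLoopA r (junk ++ ks) ns = warLoopD ks ns r := by
  induction ns with
  | nil => intro junk ks r _ _ _; rfl
  | cons n rest ih =>
    intro junk ks r hns hks hjunk
    rw [List.pairwise_cons] at hns
    have hjf : junk.filter (fun x => decide (n < x)) = [] :=
      List.filter_eq_nil_iff.mpr (fun x hx => by
        have := hjunk x hx n (List.mem_cons_self); simp; omega)
    have hfilter : (junk ++ ks).filter (fun x => decide (n < x)) = dropLe n ks := by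
      rw [List.filter_append, hjf, filter_gt_sorted n ks hks, List.nil_append]
    cases hdrop : dropLe n ks with
    | nil =>
      rw [warLoopA_cons_empty _ _ _ _ (hfilter.trans hdrop)]
      rw [warLoopD, hdrop]
      have hks_le : ∀ x ∈ ks, x ≤ n := by
        intro x hx
        have := List.filter_eq_nil_iff.mp (hfilter.trans hdrop) x (List.mem_append.mpr (Or.inr hx))
        simp at this; omega
      have := ih (junk ++ ks) [] (r + 1) hns.2 (List.Pairwise.nil)
        (fun x hx n' hn' => by
          rcases List.mem_append.mp hx with h1 | h1
          · exact hjunk x h1 n' (List.mem_cons_of_mem n hn')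
          · have h2 := hks_le x h1
            have h3 := hns.1 n' hn'
            omega)
      rwa [List.append_nil] at this
    | cons h t =>
      have hne : (junk ++ ks).filter (fun x => decide (n < x)) ≠ [] := by
        rw [hfilter, hdrop]; exact List.cons_ne_nil h t
      have hsub : (h :: t).Sublist ks := hdrop ▸ dropLe_sublist n ks
      have hpair : (h :: t).Pairwise (· ≤ ·) := hks.sublist hsub
      have hminV : minV ((junk ++ ks).filter (fun x => decide (n < x))) = h := by
        rw [hfilter, hdrop]
        exact minV_eq _ _ List.mem_cons_self (fun y hy => by
          rcases List.mem_cons.mp hy with rfl | hy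
          · exact le_refl _
          · exact (List.pairwise_cons.mp hpair).1 y hy)
      have hnot : h ∉ junk := by
        intro hc
        have h1 := hjunk h hc n List.mem_cons_self
        have h2 := dropLe_head_gt n ks h t hdrop
        omega
      rw [warLoopA_cons_ne _ _ _ _ hne, hminV, List.erase_append_right _ hnot,
          erase_head_dropLe n ks h t hdrop, warLoopD, hdrop, ← List.append_assoc]
      exact ih (junk ++ takeLe n ks) t r hns.2
        (List.pairwise_cons.mp hpair).2
        (fun x hx n' hn' => by
          rcases List.mem_append.mp hx with h1 | h1
          · exact hjunk x h1 n' (List.mem_cons_of_mem n hn')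
          · have h2 := takeLe_le n ks x h1
            have h3 := hns.1 n' hn'
            omega)

-- the while loop lands exactly past the prefix of remaining blocks ≤ n
theorem skipB_spec (ks : List Int) (n : Int) : ∀ (j : Nat), j ≤ ks.length →
    skipB ks n j ≤ ks.length ∧ ks.drop (skipB ks n j) = dropLe n (ks.drop j) := by
  intro j
  fun_induction skipB ks n j with
  | case1 j h hle ih =>
    intro _
    obtain ⟨ih1, ih2⟩ := ih h
    refine ⟨ih1, ?_⟩
    rw [ih2, List.drop_eq_getElem_cons h]
    simp only [dropLe, if_pos hle]
  | case2 j h hle =>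
    intro _
    refine ⟨le_of_lt h, ?_⟩
    rw [List.drop_eq_getElem_cons h]
    simp only [dropLe, if_neg hle]
  | case3 j h =>
    intro hj
    have : j = ks.length := by omega
    subst this
    simp [dropLe]

theorem warLoopD_cons_nil (ks : List Int) (n : Int) (rest : List Int) (r : Int)
    (h : dropLe n ks = []) : warLoopD ks (n :: rest) r = warLoopD [] rest (r + 1) := by
  rw [warLoopD, h]

theorem warLoopD_cons_cons (ks : List Int) (n : Int) (rest : List Int) (r : Int)
    (h : Int) (t : List Int) (hd : dropLe n ks = h :: t) :
    warLoopD ks (n :: rest) r = warLoopD t rest r := by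
  rw [warLoopD, hd]

-- B's index sweep equals the drop-based sweep
theorem warLoopB_eq_D (ks : List Int) (ns : List Int) : ∀ (j : Nat) (r : Int),
    j ≤ ks.length → warLoopB ks ns j r = warLoopD (ks.drop j) ns r := by
  induction ns with
  | nil => intro j r _; rfl
  | cons n rest ih =>
    intro j r hj
    obtain ⟨hle, hdrop⟩ := skipB_spec ks n j hj
    rw [warLoopB]
    by_cases hlt : skipB ks n j < ks.length
    · rw [if_pos hlt]
      rw [warLoopD_cons_cons (ks.drop j) n rest r (ks[skipB ks n j]) (ks.drop (skipB ks n j + 1))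
        (by rw [← hdrop, List.drop_eq_getElem_cons hlt])]
      exact ih (skipB ks n j + 1) r hlt
    · rw [if_neg hlt]
      have hlen : skipB ks n j = ks.length := by omega
      rw [warLoopD_cons_nil (ks.drop j) n rest r (by rw [← hdrop, hlen, List.drop_length])]
      rw [ih (skipB ks n j) (r + 1) hle, hlen, List.drop_length]

-- ===== VERDICT (by name: the statement is the Claim_ definition above) =====
theorem get_war_results_spec : Claim_equal_get_war_results := by
  intro ns ks _
  unfold Spec_get_war_results get_war_results get_war_results_alt
  have h1 : warLoopA 0 ks ns = warLoopA 0 ks (PySem.List.sorted ns (fun x => x)) :=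
    warLoopA_naomi_perm (PySem.List.sorted_perm ns (fun x => x) false).symm ks 0
  have h2 : warLoopA 0 ks (PySem.List.sorted ns (fun x => x)) =
      warLoopA 0 (PySem.List.sorted ks (fun x => x)) (PySem.List.sorted ns (fun x => x)) :=
    warLoopA_perm _ _ _ 0 (PySem.List.sorted_perm ks (fun x => x) false).symm
  have h3 : warLoopA 0 ([] ++ PySem.List.sorted ks (fun x => x))
        (PySem.List.sorted ns (fun x => x)) =
      warLoopD (PySem.List.sorted ks (fun x => x)) (PySem.List.sorted ns (fun x => x)) 0 :=
    warLoopA_sorted _ [] _ 0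
      (by simpa using PySem.List.sorted_pairwise ns (fun x => x))
      (by simpa using PySem.List.sorted_pairwise ks (fun x => x))
      (by intro x hx; simp at hx)
  have h4 := warLoopB_eq_D (PySem.List.sorted ks (fun x => x))
      (PySem.List.sorted ns (fun x => x)) 0 0 (Nat.zero_le _)
  rw [List.nil_append] at h3
  rw [h1, h2, h3, h4, List.drop_zero]
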